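-- pv_equiv track=rewrite | github.com/tobybenjaminclark/wotsitbot | cream_cheese/__main__.py | insert_newline
-- ===== SOURCE A (Python) =====
-- def insert_newline(input_string, line_length=50):
--     count = 0
--     input_string = list(input_string)
--
--     for index, char in enumerate(input_string):
--         count += 1
--         if count >= line_length and char == ' ':
--             input_string[index] = '\n'
--             count = 0
--
--     return "".join(input_string)
-- ===== SOURCE B (Python) =====
-- def insert_newline(input_string, line_length=50):
--     chars = list(input_string)
--     spaces = [i for i, c in enumerate(chars) if c == ' ']
--     last = -1
--     for idx in spaces:
--         if idx - last >= line_length: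
--             chars[idx] = '\n'
--             last = idx
--     return "".join(chars)
-- ===== Notes on version B (the rewrite author's own statement) =====
-- stated objective: alternative
-- what changed: Replaces A's single stateful scan with a running character counter by a two-phase pass: first collect all space indices, then greedily turn a space into a newline whenever its index-gap from the last break reaches line_length.
import Mathlib
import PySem

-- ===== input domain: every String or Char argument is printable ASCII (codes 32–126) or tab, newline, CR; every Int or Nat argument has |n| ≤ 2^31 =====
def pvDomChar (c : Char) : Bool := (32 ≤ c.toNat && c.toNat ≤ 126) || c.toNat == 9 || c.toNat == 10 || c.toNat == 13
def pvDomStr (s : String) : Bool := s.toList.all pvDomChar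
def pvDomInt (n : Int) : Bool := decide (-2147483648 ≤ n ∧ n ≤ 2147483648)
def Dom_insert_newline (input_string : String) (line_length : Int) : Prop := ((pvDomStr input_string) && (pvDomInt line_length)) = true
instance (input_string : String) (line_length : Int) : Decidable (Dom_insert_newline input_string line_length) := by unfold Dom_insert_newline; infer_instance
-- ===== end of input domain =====

-- B replaces A's one stateful counter scan by a two-phase pass (collect space indices, then greedily mark breaks); alternative decomposition, same cost.

-- ===== PORT A =====
-- A's for-loop: count advances on every char; a space reached with count ≥ line_length
-- becomes '\n' and resets count. The in-place list write is at the current index only,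
-- so the loop is the obvious structural recursion producing the output list.
def pvScanA : List Char → Int → Int → List Char
  | [], _, _ => []
  | c :: rest, count, lineLength =>
    let count' := count + 1
    if count' ≥ lineLength ∧ c = ' ' then '\n' :: pvScanA rest 0 lineLength
    else c :: pvScanA rest count' lineLength

def insert_newline (input_string : String) (line_length : Int) : String :=
  String.ofList (pvScanA input_string.toList 0 line_length)

-- ===== PORT B =====
-- phase 1 of Source B: the comprehension collecting indices of spaces
def pvSpaceIdxs : List Char → Nat → List Nat
  | [], _ => []
  | c :: rest, i => if c = ' ' then i :: pvSpaceIdxs rest (i + 1) else pvSpaceIdxs rest (i + 1)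

-- phase 2 of Source B: walk the space indices with `last`, setting chosen positions to '\n'
def pvMark : List Nat → Int → Int → List Char → List Char
  | [], _, _, chars => chars
  | idx :: rest, last, lineLength, chars =>
    if (idx : Int) - last ≥ lineLength then pvMark rest (idx : Int) lineLength (chars.set idx '\n')
    else pvMark rest last lineLength chars

def insert_newline_alt (input_string : String) (line_length : Int) : String :=
  String.ofList (pvMark (pvSpaceIdxs input_string.toList 0) (-1) line_length input_string.toList)

-- ===== PRECONDITION & SPEC =====
def Spec_insert_newline (input_string : String) (line_length : Int) (out : String) : Prop := out = insert_newline_alt input_string line_length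
instance (input_string : String) (line_length : Int) (out : String) : Decidable (Spec_insert_newline input_string line_length out) := by unfold Spec_insert_newline; infer_instance

-- ===== CLAIM (what is proved, stated in full; the proofs are below) =====
def Claim_equal_insert_newline : Prop := ∀ (input_string : String) (line_length : Int), Dom_insert_newline input_string line_length → Spec_insert_newline input_string line_length (insert_newline input_string line_length)

-- ===== LEMMAS AND PROOFS =====

-- shifting all space indices by one
theorem pvSpaceIdxs_shift (cs : List Char) : ∀ i : Nat,
    pvSpaceIdxs cs (i + 1) = (pvSpaceIdxs cs i).map (· + 1) := by
  induction cs with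
  | nil => intro i; simp [pvSpaceIdxs]
  | cons c rest ih =>
    intro i
    by_cases h : c = ' ' <;> simp [pvSpaceIdxs, h, ih (i + 1)]

-- marking shifted indices on a cons'd list
theorem pvMark_shift (idxs : List Nat) : ∀ (last lineLength : Int) (c : Char) (arr : List Char),
    pvMark (idxs.map (· + 1)) last lineLength (c :: arr)
      = c :: pvMark idxs (last - 1) lineLength arr := by
  induction idxs with
  | nil => intro last L c arr; simp [pvMark]
  | cons idx rest ih =>
    intro last L c arr
    have hc : ((idx : Int) + 1) - last ≥ L ↔ (idx : Int) - (last - 1) ≥ L := by omega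
    by_cases h : (idx : Int) - (last - 1) ≥ L
    · have h' : ((↑(idx + 1) : Int) - last ≥ L) := by push_cast; omega
      simp only [List.map_cons, pvMark, h', if_pos]
      rw [show (c :: arr).set (idx + 1) '\n' = c :: arr.set idx '\n' from rfl]
      rw [ih]
      simp [h]
    · have h' : ¬ ((↑(idx + 1) : Int) - last ≥ L) := by push_cast; omega
      simp only [List.map_cons, pvMark, h', if_neg, not_false_iff]
      rw [ih]
      simp [h]

-- unfolding lemma for A's scan
theorem pvScanA_cons (c : Char) (rest : List Char) (count lineLength : Int) :
    pvScanA (c :: rest) count lineLength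
      = if count + 1 ≥ lineLength ∧ c = ' ' then '\n' :: pvScanA rest 0 lineLength
        else c :: pvScanA rest (count + 1) lineLength := rfl

-- unfolding lemma for B's marking pass
theorem pvMark_cons (idx : Nat) (rest : List Nat) (last lineLength : Int) (chars : List Char) :
    pvMark (idx :: rest) last lineLength chars
      = if (idx : Int) - last ≥ lineLength then pvMark rest (idx : Int) lineLength (chars.set idx '\n')
        else pvMark rest last lineLength chars := rfl

-- main invariant: B's two-phase mark equals A's scan when count = -last - 1
theorem pv_main (cs : List Char) : ∀ (last lineLength : Int),
    pvMark (pvSpaceIdxs cs 0) last lineLength cs = pvScanA cs (-last - 1) lineLength := by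
  induction cs with
  | nil => intro last L; simp [pvSpaceIdxs, pvMark, pvScanA]
  | cons c rest ih =>
    intro last L
    have hshift : pvSpaceIdxs rest 1 = (pvSpaceIdxs rest 0).map (· + 1) := by
      simpa using pvSpaceIdxs_shift rest 0
    rw [pvScanA_cons]
    by_cases h : c = ' '
    · subst h
      rw [show pvSpaceIdxs (' ' :: rest) 0 = 0 :: pvSpaceIdxs rest 1 from rfl, hshift, pvMark_cons]
      by_cases hb : ((0 : Nat) : Int) - last ≥ L
      · rw [if_pos hb]
        rw [show ((' ' :: rest).set 0 '\n') = '\n' :: rest from rfl]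
        rw [pvMark_shift, ih, if_pos ⟨by omega, rfl⟩]
        norm_num
      · rw [if_neg hb]
        rw [pvMark_shift, ih, if_neg (by intro hx; exact hb (by push_cast; omega))]
        norm_num
    · simp only [pvSpaceIdxs, if_neg h, hshift]
      rw [pvMark_shift, ih, if_neg (by rintro ⟨-, hc⟩; exact h hc)]
      rw [show -(last - 1) - 1 = -last - 1 + 1 from by omega]

-- ===== VERDICT (by name: the statement is the Claim_ definition above) =====
theorem insert_newline_spec : Claim_equal_insert_newline := by
  intro s L _
  unfold Spec_insert_newline insert_newline insert_newline_alt
  rw [pv_main]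
  norm_num
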